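-- pv_equiv track=rewrite | github.com/Mdyuzhev/LocOll | mcp-server/tools/production.py | _group_by_project
-- ===== SOURCE A (Python) =====
-- PRODUCTION_PROJECTS = ["locoll", "errorlens", "moex", "rag-qa", "scout", "warehouse"]
--
-- def _group_by_project(services: list[dict]) -> dict[str, list[dict]]:
--     """Group services list by project prefix."""
--     groups: dict[str, list[dict]] = {}
--     for svc in services:
--         name = svc["name"]
--         # Определяем проект по префиксу имени сервиса
--         project = None
--         for proj in PRODUCTION_PROJECTS:
--             prefix = proj.replace("-", "")  # rag-qa -> ragqa
--             if name.startswith(proj) or name.startswith(prefix):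
--                 project = proj
--                 break
--         if project:
--             groups.setdefault(project, []).append(svc)
--     return groups
-- ===== SOURCE B (Python) =====
-- PRODUCTION_PROJECTS = ["locoll", "errorlens", "moex", "rag-qa", "scout", "warehouse"]
--
--
-- def _classify(name):
--     """First project whose name or hyphen-stripped name prefixes `name`, else None."""
--     return next((p for p in PRODUCTION_PROJECTS
--                  if name.startswith(p) or name.startswith(p.replace("-", ""))), None)
--
--
-- def _group_by_project(services):
--     """Group services by project prefix: a labelling pass, then ordered distinct
--     keys, then one filtering pass per key (prefixes are non-overlapping, and keys
--     are taken in first-encounter order, so the result equals the one-pass build)."""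
--     labels = [_classify(svc["name"]) for svc in services]
--     keys = list(dict.fromkeys(l for l in labels if l is not None))
--     return {p: [svc for svc, l in zip(services, labels) if l == p] for p in keys}
-- ===== Notes on version B (the rewrite author's own statement) =====
-- stated objective: alternative
-- what changed: Replaces the single-pass setdefault/append accumulation with staged passes: map each service to its project label, dedup the labels in first-encounter order for the keys, then build each group by filtering the labelled service list per key.
-- outside the precondition, e.g. on _group_by_project([{'image': 'x'}]): A raises KeyError, B raises KeyError
import Mathlib
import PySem

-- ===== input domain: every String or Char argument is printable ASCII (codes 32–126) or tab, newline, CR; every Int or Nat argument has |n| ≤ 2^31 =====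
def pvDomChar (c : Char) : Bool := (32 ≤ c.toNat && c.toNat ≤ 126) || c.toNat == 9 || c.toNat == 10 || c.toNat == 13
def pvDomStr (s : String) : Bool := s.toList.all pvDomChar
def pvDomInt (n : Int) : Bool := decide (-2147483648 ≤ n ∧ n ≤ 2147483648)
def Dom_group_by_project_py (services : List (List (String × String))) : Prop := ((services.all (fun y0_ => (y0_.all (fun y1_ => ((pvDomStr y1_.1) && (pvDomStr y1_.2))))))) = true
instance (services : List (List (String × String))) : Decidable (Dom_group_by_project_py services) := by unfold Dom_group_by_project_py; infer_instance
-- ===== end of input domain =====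

-- B replaces A's single-pass setdefault/append accumulation by staged passes:
-- label every service, dedup the labels (first-encounter order) for the keys,
-- then filter the labelled services once per key (objective: alternative).

-- ===== PORT A =====
def PRODUCTION_PROJECTS_py : List String := ["locoll", "errorlens", "moex", "rag-qa", "scout", "warehouse"]

-- inner 'for proj in PRODUCTION_PROJECTS: … break' loop of A
def pvFindProj : List String → String → Option String
  | [], _ => none
  | proj :: rest, name =>
      let pfx := PySem.Str.replace proj "-" ""
      if PySem.Str.startswith name proj || PySem.Str.startswith name pfx then some proj
      else pvFindProj rest name

def group_by_project_py (services : List (List (String × String))) : List (String × List (List (String × String))) :=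
  (services.foldl (fun (groups : PySem.Dict String (List (List (String × String)))) svc =>
      match (PySem.Dict.mk svc).get? "name" with
      | none => groups      -- svc["name"]: KeyError in Python, excluded by Pre_
      | some name =>
        match pvFindProj PRODUCTION_PROJECTS_py name with
        | some project => groups.modify project [] (· ++ [svc])   -- setdefault(...).append(svc)
        | none => groups) PySem.Dict.empty).items

-- ===== PORT B =====
-- _classify: next((p for p in PRODUCTION_PROJECTS if …), None)
def pvClassify (name : String) : Option String :=
  PRODUCTION_PROJECTS_py.find? (fun p =>
    PySem.Str.startswith name p || PySem.Str.startswith name (PySem.Str.replace p "-" ""))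

def group_by_project_py_alt (services : List (List (String × String))) : List (String × List (List (String × String))) :=
  let labels := services.map (fun svc =>
      match (PySem.Dict.mk svc).get? "name" with   -- svc["name"]: KeyError excluded by Pre_
      | some name => pvClassify name
      | none => none)
  let keys := PySem.List.dedup (labels.filterMap id)   -- dict.fromkeys of the non-None labels
  keys.map (fun p => (p, ((services.zip labels).filter (fun sl => sl.2 == some p)).map Prod.fst))

-- ===== PRECONDITION & SPEC =====
-- Pre_ excludes services dicts lacking a "name" key, on which the Python raises KeyError.
def Pre_group_by_project_py (services : List (List (String × String))) : Prop :=
  ∀ svc ∈ services, "name" ∈ svc.map Prod.fst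
instance (services : List (List (String × String))) : Decidable (Pre_group_by_project_py services) := by unfold Pre_group_by_project_py; infer_instance

def pvWitness_group_by_project_py : (List (List (String × String))) :=
  [[("name", "locoll-api"), ("image", "x")], [("name", "ragqa-db")], [("name", "other")]]

def Spec_group_by_project_py (services : List (List (String × String))) (out : List (String × List (List (String × String)))) : Prop := out = group_by_project_py_alt services
instance (services : List (List (String × String))) (out : List (String × List (List (String × String)))) : Decidable (Spec_group_by_project_py services out) := by unfold Spec_group_by_project_py; infer_instance

-- ===== CLAIM (what is proved, stated in full; the proofs are below) =====
def Claim_equal_group_by_project_py : Prop := ∀ (services : List (List (String × String))), Dom_group_by_project_py services → Pre_group_by_project_py services → Spec_group_by_project_py services (group_by_project_py services)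

-- ===== LEMMAS AND PROOFS =====

-- the label both programs attach to a service
def pvLabel (svc : List (String × String)) : Option String :=
  match (PySem.Dict.mk svc).get? "name" with
  | some name => pvFindProj PRODUCTION_PROJECTS_py name
  | none => none

-- the labelled services that get grouped, as (project, service) pairs
def pvPairs (services : List (List (String × String))) : List (String × List (String × String)) :=
  services.filterMap (fun svc => (pvLabel svc).map (fun p => (p, svc)))

-- A's inner scan IS find? with the same predicate
theorem findProj_eq (l : List String) (name : String) :
    pvFindProj l name = l.find? (fun p =>
      PySem.Str.startswith name p || PySem.Str.startswith name (PySem.Str.replace p "-" "")) := by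
  induction l with
  | nil => rfl
  | cons p rest ih =>
      simp only [pvFindProj, List.find?_cons]
      cases h : (PySem.Str.startswith name p ||
          PySem.Str.startswith name (PySem.Str.replace p "-" "")) <;> simp [ih]

theorem classify_eq (name : String) : pvFindProj PRODUCTION_PROJECTS_py name = pvClassify name := by
  simp only [pvClassify]; exact findProj_eq _ _

-- A's fold over services is the plain modify-fold over the labelled pairs
theorem foldlA_eq (services : List (List (String × String)))
    (d : PySem.Dict String (List (List (String × String)))) :
    services.foldl (fun groups svc =>
      match (PySem.Dict.mk svc).get? "name" with
      | none => groups
      | some name =>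
        match pvFindProj PRODUCTION_PROJECTS_py name with
        | some project => groups.modify project [] (· ++ [svc])
        | none => groups) d
    = (pvPairs services).foldl (fun g pr => g.modify pr.1 [] (· ++ [pr.2])) d := by
  induction services generalizing d with
  | nil => rfl
  | cons svc rest ih =>
      simp only [List.foldl_cons, pvPairs, List.filterMap_cons]
      cases h : pvLabel svc with
      | none =>
          unfold pvLabel at h
          cases hn : (PySem.Dict.mk svc).get? "name" with
          | none => simp [hn] at h ⊢; exact ih d
          | some name => simp [hn] at h ⊢; simp [h]; exact ih d
      | some p =>
          unfold pvLabel at h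
          cases hn : (PySem.Dict.mk svc).get? "name" with
          | none => simp [hn] at h
          | some name => simp [hn] at h ⊢; simp [h]; exact ih _

-- B's non-None labels are the pairs' keys
theorem labels_eq (services : List (List (String × String))) :
    List.filterMap pvLabel services = (pvPairs services).map Prod.fst := by
  induction services with
  | nil => rfl
  | cons svc rest ih =>
      simp only [List.filterMap_cons, pvPairs] at *
      cases h : pvLabel svc <;> simp [ih]

-- B's per-key zip-filter equals the pairs' per-key filter
theorem filter_eq (services : List (List (String × String))) (p : String) :
    ((services.zip (services.map pvLabel)).filter (fun sl => sl.2 == some p)).map Prod.fst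
    = ((pvPairs services).filter (fun pr => pr.1 == p)).map Prod.snd := by
  induction services with
  | nil => rfl
  | cons svc rest ih =>
      simp only [List.map_cons, List.zip_cons_cons, List.filter_cons, pvPairs,
        List.filterMap_cons] at *
      cases h : pvLabel svc with
      | none => simp [ih]
      | some q =>
          by_cases hq : q = p
          · subst hq; simp [ih]
          · simp [hq, ih]

-- ===== VERDICT (by name: the statement is the Claim_ definition above) =====
theorem group_by_project_py_spec : Claim_equal_group_by_project_py := by
  intro services _ _
  unfold Spec_group_by_project_py group_by_project_py group_by_project_py_alt
  rw [foldlA_eq]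
  have hB : (services.map (fun svc =>
      match (PySem.Dict.mk svc).get? "name" with
      | some name => pvClassify name
      | none => none)) = services.map pvLabel := by
    apply List.map_congr_left
    intro svc _
    unfold pvLabel
    cases (PySem.Dict.mk svc).get? "name" <;> simp [classify_eq]
  rw [hB]
  have hnd : ((pvPairs services).foldl (fun g pr => g.modify pr.1 [] (· ++ [pr.2]))
      PySem.Dict.empty).keys.Nodup := by
    exact PySem.Dict.nodup_keys_foldl_modify_key _ _ _ _ _ PySem.Dict.nodup_keys_empty
  rw [PySem.Dict.items_eq_map_keys _ hnd []]
  rw [PySem.Dict.keys_foldl_modify_key]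
  simp only [PySem.List.dedup_eq_ofList, List.filterMap_map]
  have hfm : List.filterMap (id ∘ pvLabel) services = List.filterMap pvLabel services := rfl
  rw [hfm, labels_eq]
  have hupd : PySem.Set.update (PySem.Dict.empty (κ := String)
      (ν := List (List (String × String)))).keys ((pvPairs services).map Prod.fst)
      = PySem.Set.ofList ((pvPairs services).map Prod.fst) := rfl
  rw [hupd]
  apply List.map_congr_left
  intro p _
  rw [PySem.Dict.getD_foldl_modify_append, filter_eq]
  simp
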